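-- pv_equiv track=rewrite | github.com/saa938/quantum-hash | classical_time.py | toy_hash_bits
-- ===== SOURCE A (Python) =====
-- n = 4
--
-- m = n
--
-- A = [
--     [0, 0, 1, 0, 0, 0, 1, 0, 0, 0],
--     [1, 0, 0, 1, 0, 0, 0, 1, 0, 0],
--     [1, 1, 1, 0, 0, 1, 0, 0, 1, 0],
--     [0, 1, 0, 0, 1, 0, 1, 0, 0, 1],
--     [1, 0, 1, 0, 1, 1, 0, 1, 0, 0],
--     [1, 1, 1, 1, 1, 0, 1, 0, 1, 1],
--     [0, 1, 0, 1, 0, 0, 1, 1, 0, 0],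
--     [1, 0, 1, 0, 1, 1, 0, 0, 1, 0],
--     [1, 1, 0, 0, 0, 1, 1, 0, 0, 1],
--     [0, 0, 1, 1, 0, 0, 1, 1, 1, 0],
-- ]
--
-- def toy_hash_bits(x: int) -> str:
--     """Simple parity-based hash function."""
--     bits = []
--     for j in range(m):
--         s = 0
--         for i in range(n):
--             if A[j][i]:
--                 s ^= ((x >> i) & 1)
--         bits.append(str(s))
--     return ''.join(bits)
-- ===== SOURCE B (Python) =====
-- # B: rows kept as packed 4-bit masks; each output bit = parity of (x & mask) via a xor fold (no per-bit matrix scan)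
-- MASKS = (0b0100, 0b1001, 0b0111, 0b0010)  # bit i of MASKS[j] = A[j][i] for i < 4 (only the first 4 columns of A are used)
--
-- def toy_hash_bits(x: int) -> str:
--     def bit(mask):
--         v = x & mask          # keep only the selected input bits (always in 0..15)
--         v ^= v >> 2           # fold bits 3,2 into 1,0
--         v ^= v >> 1           # fold bit 1 into 0
--         return str(v & 1)     # parity of the selected bits
--     return ''.join(bit(mask) for mask in MASKS)
-- ===== Notes on version B (the rewrite author's own statement) =====
-- stated objective: alternative
-- what changed: The 4x4 matrix scan with an inner per-bit loop is replaced by four precomputed per-row bitmasks; each output bit is the parity of x & mask computed by a xor-fold (v ^= v>>2; v ^= v>>1), so no inner loop over bit positions and no matrix indexing remain.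
import Mathlib
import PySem

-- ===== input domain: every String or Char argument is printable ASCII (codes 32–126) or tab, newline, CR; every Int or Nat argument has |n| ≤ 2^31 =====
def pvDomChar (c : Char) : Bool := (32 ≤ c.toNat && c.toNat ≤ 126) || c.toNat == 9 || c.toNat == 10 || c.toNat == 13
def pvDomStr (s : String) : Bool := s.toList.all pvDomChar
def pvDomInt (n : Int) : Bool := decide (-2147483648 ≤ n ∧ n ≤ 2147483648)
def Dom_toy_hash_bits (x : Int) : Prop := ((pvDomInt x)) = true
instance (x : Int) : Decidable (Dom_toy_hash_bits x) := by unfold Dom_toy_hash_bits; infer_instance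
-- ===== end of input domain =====

-- B replaces A's matrix scan with per-row bitmasks and a xor-fold parity; equal return value on every int.

-- ===== PORT A =====
def pvA : List (List Int) := [
  [0, 0, 1, 0, 0, 0, 1, 0, 0, 0],
  [1, 0, 0, 1, 0, 0, 0, 1, 0, 0],
  [1, 1, 1, 0, 0, 1, 0, 0, 1, 0],
  [0, 1, 0, 0, 1, 0, 1, 0, 0, 1],
  [1, 0, 1, 0, 1, 1, 0, 1, 0, 0],
  [1, 1, 1, 1, 1, 0, 1, 0, 1, 1],
  [0, 1, 0, 1, 0, 0, 1, 1, 0, 0],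
  [1, 0, 1, 0, 1, 1, 0, 0, 1, 0],
  [1, 1, 0, 0, 0, 1, 1, 0, 0, 1],
  [0, 0, 1, 1, 0, 0, 1, 1, 1, 0]]
def pvN : Int := 4
def pvM : Int := pvN

def toy_hash_bits (x : Int) : String :=
  let bits : List String := (PySem.List.pyRange 0 pvM 1).foldl (fun bits j =>
    let s : Int := (PySem.List.pyRange 0 pvN 1).foldl (fun s i =>
      -- `if A[j][i]:` — int truthiness; j, i always in range, so getD defaults are never taken
      if ((PySem.List.pyGet? ((PySem.List.pyGet? pvA j).getD []) i).getD 0) ≠ 0 then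
        -- s ^= ((x >> i) & 1); i ∈ range(4) is nonnegative, so `.toNat` is exact
        PySem.Int.bxor s (PySem.Int.band (x >>> i.toNat) 1)
      else s) 0
    bits ++ [PySem.Int.toStr s]) []
  PySem.Str.join "" bits

-- ===== PORT B =====
def pvMasks : List Int := [4, 9, 7, 2]  -- 0b0100, 0b1001, 0b0111, 0b0010

def toy_hash_bits_alt (x : Int) : String :=
  PySem.Str.join "" (pvMasks.map (fun mask =>
    let v0 := PySem.Int.band x mask
    let v1 := PySem.Int.bxor v0 (v0 >>> (2 : Nat))
    let v2 := PySem.Int.bxor v1 (v1 >>> (1 : Nat))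
    PySem.Int.toStr (PySem.Int.band v2 1)))

-- ===== PRECONDITION & SPEC =====
def Spec_toy_hash_bits (x : Int) (out : String) : Prop := out = toy_hash_bits_alt x
instance (x : Int) (out : String) : Decidable (Spec_toy_hash_bits x out) := by unfold Spec_toy_hash_bits; infer_instance

-- ===== CLAIM (what is proved, stated in full; the proofs are below) =====
def Claim_equal_toy_hash_bits : Prop := ∀ (x : Int), Dom_toy_hash_bits x → Spec_toy_hash_bits x (toy_hash_bits x)

-- ===== LEMMAS AND PROOFS =====

theorem pv_pow_ge_16 {i : Nat} (h : 4 ≤ i) : 16 ≤ 2 ^ i := by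
  calc (16 : Nat) = 2 ^ 4 := rfl
    _ ≤ 2 ^ i := Nat.pow_le_pow_right (by omega) h

-- a &&& m only looks at the low 4 bits of a when m < 16
theorem pv_nat_and_mod16 (a m : Nat) (hm : m < 16) : a &&& m = a % 16 &&& m := by
  apply Nat.eq_of_testBit_eq
  intro i
  rcases lt_or_ge i 4 with hi | hi
  · have h := Nat.testBit_mod_two_pow a 4 i
    rw [Nat.testBit_land, Nat.testBit_land, show (16 : Nat) = 2 ^ 4 from rfl, h]
    simp [hi]
  · have hm' : m.testBit i = false :=
      Nat.testBit_lt_two_pow (lt_of_lt_of_le hm (pv_pow_ge_16 hi))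
    rw [Nat.testBit_land, Nat.testBit_land, hm']
    simp

theorem pv_nat_core (m t : Nat) (hm : m < 16) (ht : t < 16) :
    m - (m &&& t) = (15 - t) &&& m := by
  interval_cases m <;> interval_cases t <;> rfl

-- Python's x & m depends only on x mod 16 when 0 ≤ m < 16
theorem pv_band_mod16 (x m : Int) (h0 : 0 ≤ m) (hm : m < 16) :
    PySem.Int.band x m = PySem.Int.band (x % 16) m := by
  have hx16 : 0 ≤ x % 16 := Int.emod_nonneg x (by norm_num)
  rcases lt_or_ge x 0 with hx' | hx
  swap
  · rw [PySem.Int.band_of_nonneg hx h0, PySem.Int.band_of_nonneg hx16 h0]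
    congr 1
    have htoNat : (x % 16).toNat = x.toNat % 16 := by omega
    rw [htoNat]
    exact pv_nat_and_mod16 x.toNat m.toNat (by omega)
  · unfold PySem.Int.band
    rw [if_neg (by omega), if_pos h0, if_pos hx16, if_pos h0]
    congr 1
    have h15 : (x % 16).toNat = 15 - (-x - 1).toNat % 16 := by omega
    rw [h15]
    have hper : m.toNat &&& (-x - 1).toNat = m.toNat &&& (-x - 1).toNat % 16 := by
      rw [Nat.land_comm, Nat.land_comm m.toNat ((-x - 1).toNat % 16)]
      exact pv_nat_and_mod16 (-x - 1).toNat m.toNat (by omega)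
    rw [hper]
    exact pv_nat_core m.toNat ((-x - 1).toNat % 16) (by omega) (Nat.mod_lt _ (by norm_num))

-- Python's (x >> i) & 1 depends only on x mod 16 when i < 4
theorem pv_shift_band_mod16 (x : Int) (i : Nat) (hi : i < 4) :
    PySem.Int.band (x >>> i) 1 = PySem.Int.band ((x % 16) >>> i) 1 := by
  rw [PySem.Int.band_one, PySem.Int.band_one,
      Int.shiftRight_eq_div_pow, Int.shiftRight_eq_div_pow]
  unfold PySem.Int.mod
  simp only [Int.fmod_eq_emod]
  interval_cases i <;> norm_num <;> omega

theorem pv_periodic_A (x : Int) : toy_hash_bits x = toy_hash_bits (x % 16) := by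
  unfold toy_hash_bits
  refine congrArg (PySem.Str.join "") ?_
  refine PySem.List.foldl_congr_mem _ _ _ _ ?_
  intro bits j _
  refine congrArg (fun s => bits ++ [PySem.Int.toStr s]) ?_
  refine PySem.List.foldl_congr_mem _ _ _ _ ?_
  intro s i hi
  have hi4 : i.toNat < 4 := by
    have hmem : i ∈ ([0, 1, 2, 3] : List Int) := by
      rw [show ([0, 1, 2, 3] : List Int) = PySem.List.pyRange 0 pvN 1 from by decide]
      exact hi
    fin_cases hmem <;> decide
  rw [pv_shift_band_mod16 x i.toNat hi4]

theorem pv_periodic_B (x : Int) : toy_hash_bits_alt x = toy_hash_bits_alt (x % 16) := by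
  unfold toy_hash_bits_alt
  refine congrArg (PySem.Str.join "") ?_
  apply List.map_congr_left
  intro mask hmask
  have hb : PySem.Int.band x mask = PySem.Int.band (x % 16) mask := by
    fin_cases hmask <;> exact pv_band_mod16 _ _ (by norm_num) (by norm_num)
  simp only [hb]

-- ===== VERDICT (by name: the statement is the Claim_ definition above) =====
theorem toy_hash_bits_spec : Claim_equal_toy_hash_bits := by
  intro x _
  unfold Spec_toy_hash_bits
  rw [pv_periodic_A, pv_periodic_B]
  have h0 : 0 ≤ x % 16 := Int.emod_nonneg x (by norm_num)
  have h1 : x % 16 < 16 := Int.emod_lt_of_pos x (by norm_num)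
  interval_cases h : (x % 16) <;> decide
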